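-- pv_equiv track=rewrite | github.com/SabineSerwanska/Python_for_DQE | HW_4_Functions_1a.py | analyze_dicts
-- ===== SOURCE A (Python) =====
-- def analyze_dicts(data_list):
--     """
--     Analyze the list of dictionaries:
--     - Find the highest value for each key (best_val)
--     - Store the dictionary number with the highest value (best_idx)
--     - Count how many times each key appears (counts)
--     """
--     best_val = {}                            # Store highest value for each key
--     best_idx = {}                            # Store dict number with highest value
--     counts = {}                              # Store count of each key
--     for i, d in enumerate(data_list, start=1):   # Loop through dictionaries with index
--         for k, v in d.items():                   # Loop through key-value pairs
--             counts[k] = counts.get(k, 0) + 1     # Increment key count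
--             if k not in best_val or v > best_val[k]:  # If new max value found
--                 best_val[k] = v                  # Update highest value
--                 best_idx[k] = i                  # Update dict number
--     return best_val, best_idx, counts            # Return analysis results
-- ===== SOURCE B (Python) =====
-- def analyze_dicts(data_list):
--     # Group-then-reduce decomposition: one pass builds per-key buckets of
--     # (dict_number, value) entries and the counts; a second pass picks each
--     # bucket's first maximal entry (max keeps the earliest on ties).
--     buckets = {}
--     counts = {}
--     for i, d in enumerate(data_list, start=1):
--         for k, v in d.items():
--             buckets.setdefault(k, []).append((i, v))
--             counts[k] = counts.get(k, 0) + 1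
--     best_val = {}
--     best_idx = {}
--     for k, entries in buckets.items():
--         i, v = max(entries, key=lambda e: e[1])
--         best_val[k] = v
--         best_idx[k] = i
--     return best_val, best_idx, counts
-- ===== Notes on version B (the rewrite author's own statement) =====
-- stated objective: alternative
-- what changed: Replaces A's single streaming pass that conditionally updates best_val/best_idx with a group-then-reduce decomposition: one pass buckets (index, value) entries per key and counts keys, then a second pass takes each bucket's max (first maximal entry, preserving A's earliest-index tie-break).
import Mathlib
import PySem

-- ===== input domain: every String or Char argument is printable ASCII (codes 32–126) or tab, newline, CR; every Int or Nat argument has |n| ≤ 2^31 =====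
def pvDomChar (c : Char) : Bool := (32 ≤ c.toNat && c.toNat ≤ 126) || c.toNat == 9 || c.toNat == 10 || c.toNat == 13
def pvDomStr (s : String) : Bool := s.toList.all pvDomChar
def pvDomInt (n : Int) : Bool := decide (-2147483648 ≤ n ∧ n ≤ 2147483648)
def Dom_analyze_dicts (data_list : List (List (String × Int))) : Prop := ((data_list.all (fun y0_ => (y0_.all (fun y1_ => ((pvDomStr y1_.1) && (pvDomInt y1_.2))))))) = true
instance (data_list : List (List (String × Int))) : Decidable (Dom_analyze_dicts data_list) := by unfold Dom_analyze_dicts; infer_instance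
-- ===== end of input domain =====

-- B replaces A's streaming conditional-update pass with a group-then-reduce decomposition
-- (bucket (index, value) entries per key, then take each bucket's first maximal entry); alternative, same cost.

-- ===== PORT A =====
def analyze_dicts (data_list : List (List (String × Int))) :
    (List (String × Int)) × (List (String × Int)) × (List (String × Int)) :=
  let st := (PySem.List.enumerate data_list 1).foldl
    (fun (st : PySem.Dict String Int × PySem.Dict String Int × PySem.Dict String Int) id =>
      ((PySem.Dict.ofList id.2).items).foldl
        (fun st kv =>
          let counts := st.2.2.insert kv.1 (st.2.2.getD kv.1 0 + 1)
          if !st.1.contains kv.1 || decide (st.1.getD kv.1 0 < kv.2) then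
            (st.1.insert kv.1 kv.2, st.2.1.insert kv.1 id.1, counts)
          else
            (st.1, st.2.1, counts))
        st)
    (PySem.Dict.empty, PySem.Dict.empty, PySem.Dict.empty)
  (st.1.items, st.2.1.items, st.2.2.items)

-- ===== PORT B =====
def analyze_dicts_alt (data_list : List (List (String × Int))) :
    (List (String × Int)) × (List (String × Int)) × (List (String × Int)) :=
  let bc := (PySem.List.enumerate data_list 1).foldl
    (fun (bc : PySem.Dict String (List (Int × Int)) × PySem.Dict String Int) id =>
      ((PySem.Dict.ofList id.2).items).foldl
        (fun bc kv =>
          (bc.1.modify kv.1 [] (· ++ [(id.1, kv.2)]),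
           bc.2.insert kv.1 (bc.2.getD kv.1 0 + 1)))
        bc)
    (PySem.Dict.empty, PySem.Dict.empty)
  let bb := bc.1.items.foldl
    (fun (bb : PySem.Dict String Int × PySem.Dict String Int) ke =>
      match PySem.List.max? ke.2 (fun e => e.2) with
      | some m => (bb.1.insert ke.1 m.2, bb.2.insert ke.1 m.1)
      | none => bb)
    (PySem.Dict.empty, PySem.Dict.empty)
  (bb.1.items, bb.2.items, bc.2.items)

-- ===== PRECONDITION & SPEC =====
def Spec_analyze_dicts (data_list : List (List (String × Int))) (out : (List (String × Int)) × (List (String × Int)) × (List (String × Int))) : Prop := out = analyze_dicts_alt data_list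
instance (data_list : List (List (String × Int))) (out : (List (String × Int)) × (List (String × Int)) × (List (String × Int))) : Decidable (Spec_analyze_dicts data_list out) := by unfold Spec_analyze_dicts; infer_instance

-- ===== CLAIM (what is proved, stated in full; the proofs are below) =====
def Claim_equal_analyze_dicts : Prop := ∀ (data_list : List (List (String × Int))), Dom_analyze_dicts data_list → Spec_analyze_dicts data_list (analyze_dicts data_list)

-- ===== LEMMAS AND PROOFS =====

-- the flattened event stream: (key, (dict number, value)) in processing order
def pvEvents (data_list : List (List (String × Int))) : List (String × Int × Int) :=
  (PySem.List.enumerate data_list 1).flatMap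
    (fun id => (PySem.Dict.ofList id.2).items.map (fun kv => (kv.1, (id.1, kv.2))))

-- A's step on the event stream, best_val/best_idx pair only
def pvStepA (p : PySem.Dict String Int × PySem.Dict String Int) (e : String × Int × Int) :
    PySem.Dict String Int × PySem.Dict String Int :=
  if !p.1.contains e.1 || decide (p.1.getD e.1 0 < e.2.2) then
    (p.1.insert e.1 e.2.2, p.2.insert e.1 e.2.1)
  else p

-- the shared counts step
def pvStepC (c : PySem.Dict String Int) (e : String × Int × Int) : PySem.Dict String Int :=
  c.insert e.1 (c.getD e.1 0 + 1)

-- B's bucket step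
def pvStepBk (d : PySem.Dict String (List (Int × Int))) (e : String × Int × Int) :
    PySem.Dict String (List (Int × Int)) :=
  d.modify e.1 [] (· ++ [e.2])

-- A's full step (best_val, best_idx, counts) on the event stream
def pvStep3 (st : PySem.Dict String Int × PySem.Dict String Int × PySem.Dict String Int)
    (e : String × Int × Int) :
    PySem.Dict String Int × PySem.Dict String Int × PySem.Dict String Int :=
  let counts := st.2.2.insert e.1 (st.2.2.getD e.1 0 + 1)
  if !st.1.contains e.1 || decide (st.1.getD e.1 0 < e.2.2) then
    (st.1.insert e.1 e.2.2, st.2.1.insert e.1 e.2.1, counts)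
  else (st.1, st.2.1, counts)

-- B's phase-1 step (buckets, counts) on the event stream
def pvStepB (bc : PySem.Dict String (List (Int × Int)) × PySem.Dict String Int)
    (e : String × Int × Int) :
    PySem.Dict String (List (Int × Int)) × PySem.Dict String Int :=
  (pvStepBk bc.1 e, pvStepC bc.2 e)

-- B's phase-2 step
def pvStep2 (bb : PySem.Dict String Int × PySem.Dict String Int) (ke : String × List (Int × Int)) :
    PySem.Dict String Int × PySem.Dict String Int :=
  match PySem.List.max? ke.2 (fun e => e.2) with
  | some m => (bb.1.insert ke.1 m.2, bb.2.insert ke.1 m.1)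
  | none => bb

def pvEnt (E : List (String × Int × Int)) (k : String) : List (Int × Int) :=
  (E.filter (fun e => e.1 == k)).map (·.2)

def pvBest? (E : List (String × Int × Int)) (k : String) : Option (Int × Int) :=
  PySem.List.max? (pvEnt E k) (fun e => e.2)

lemma pv_foldl_flat {α β σ : Type} (l : List α) (h : α → List β) (g : σ → β → σ) (init : σ) :
    l.foldl (fun st x => (h x).foldl g st) init = (l.flatMap h).foldl g init := by
  induction l generalizing init with
  | nil => rfl
  | cons a t ih => simp [List.flatMap_cons, List.foldl_append, ih]

lemma pv_foldl_split3 (E : List (String × Int × Int))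
    (bv bi c : PySem.Dict String Int) :
    E.foldl pvStep3 (bv, bi, c)
    = ((E.foldl pvStepA (bv, bi)).1, (E.foldl pvStepA (bv, bi)).2, E.foldl pvStepC c) := by
  induction E generalizing bv bi c with
  | nil => rfl
  | cons e t ih =>
    simp only [List.foldl_cons, pvStep3, pvStepA, pvStepC]
    split <;> exact ih _ _ _

lemma pv_A_events (data_list : List (List (String × Int))) :
    analyze_dicts data_list =
      (((pvEvents data_list).foldl pvStepA (PySem.Dict.empty, PySem.Dict.empty)).1.items,
       ((pvEvents data_list).foldl pvStepA (PySem.Dict.empty, PySem.Dict.empty)).2.items,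
       ((pvEvents data_list).foldl pvStepC PySem.Dict.empty).items) := by
  have hin : ∀ (st : PySem.Dict String Int × PySem.Dict String Int × PySem.Dict String Int)
      (id : Int × List (String × Int)),
      List.foldl
        (fun st kv =>
          if !st.1.contains kv.1 || decide (st.1.getD kv.1 0 < kv.2) then
            (st.1.insert kv.1 kv.2, st.2.1.insert kv.1 id.1,
             st.2.2.insert kv.1 (st.2.2.getD kv.1 0 + 1))
          else (st.1, st.2.1, st.2.2.insert kv.1 (st.2.2.getD kv.1 0 + 1)))
        st (PySem.Dict.ofList id.2).items
      = List.foldl pvStep3 st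
          ((PySem.Dict.ofList id.2).items.map (fun kv => (kv.1, (id.1, kv.2)))) := by
    intro st id; rw [List.foldl_map]; rfl
  unfold analyze_dicts
  simp only [hin, pv_foldl_flat, pv_foldl_split3]
  rfl

lemma pv_B_events (data_list : List (List (String × Int))) :
    analyze_dicts_alt data_list =
      (let bk := (pvEvents data_list).foldl pvStepBk PySem.Dict.empty
       let bb := bk.items.foldl pvStep2 (PySem.Dict.empty, PySem.Dict.empty)
       (bb.1.items, bb.2.items, ((pvEvents data_list).foldl pvStepC PySem.Dict.empty).items)) := by
  have hin : ∀ (bc : PySem.Dict String (List (Int × Int)) × PySem.Dict String Int)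
      (id : Int × List (String × Int)),
      List.foldl
        (fun bc kv =>
          (bc.1.modify kv.1 [] (· ++ [(id.1, kv.2)]),
           bc.2.insert kv.1 (bc.2.getD kv.1 0 + 1)))
        bc (PySem.Dict.ofList id.2).items
      = List.foldl pvStepB bc
          ((PySem.Dict.ofList id.2).items.map (fun kv => (kv.1, (id.1, kv.2)))) := by
    intro bc id; rw [List.foldl_map]; rfl
  have hsplit : ∀ (E : List (String × Int × Int)),
      E.foldl pvStepB (PySem.Dict.empty, PySem.Dict.empty)
      = (E.foldl pvStepBk PySem.Dict.empty, E.foldl pvStepC PySem.Dict.empty) := by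
    intro E
    show E.foldl (fun s e => (pvStepBk s.1 e, pvStepC s.2 e)) (PySem.Dict.empty, PySem.Dict.empty) = _
    rw [PySem.List.foldl_prod_mk (f := pvStepBk) (g := pvStepC)]
  unfold analyze_dicts_alt
  simp only [hin, pv_foldl_flat, hsplit]
  rfl

-- appending one event to the stream
lemma pvEnt_append (E : List (String × Int × Int)) (e : String × Int × Int) (k : String) :
    pvEnt (E ++ [e]) k = pvEnt E k ++ (if e.1 == k then [e.2] else []) := by
  by_cases h : e.1 == k <;> simp [pvEnt, List.filter_append, h]

lemma pvMax_append (es : List (Int × Int)) (x : Int × Int) :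
    PySem.List.max? (es ++ [x]) (fun e => e.2)
      = some (match PySem.List.max? es (fun e => e.2) with
              | none => x
              | some m => if m.2 < x.2 then x else m) := by
  unfold PySem.List.max?
  rw [List.foldl_append]
  generalize List.foldl _ none es = r
  cases r
  · simp [List.foldl]
  · simp [List.foldl]
    split <;> rfl

lemma pvBest?_append (E : List (String × Int × Int)) (e : String × Int × Int) (k : String) :
    pvBest? (E ++ [e]) k
      = if e.1 == k then
          some (match pvBest? E k with
                | none => e.2
                | some m => if m.2 < e.2.2 then e.2 else m)
        else pvBest? E k := by
  unfold pvBest?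
  rw [pvEnt_append]
  by_cases h : e.1 == k
  · simp only [h, if_pos]
    exact pvMax_append _ _
  · simp [h]

-- characterisation of A's best_val/best_idx fold over the event stream
lemma pv_A_char (E : List (String × Int × Int)) :
    ((E.foldl pvStepA (PySem.Dict.empty, PySem.Dict.empty)).1.keys
        = PySem.Set.ofList (E.map (·.1)))
    ∧ ((E.foldl pvStepA (PySem.Dict.empty, PySem.Dict.empty)).2.keys
        = PySem.Set.ofList (E.map (·.1)))
    ∧ ∀ k, ((E.foldl pvStepA (PySem.Dict.empty, PySem.Dict.empty)).1.get? k
            = (pvBest? E k).map (·.2))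
        ∧ ((E.foldl pvStepA (PySem.Dict.empty, PySem.Dict.empty)).2.get? k
            = (pvBest? E k).map (·.1)) := by
  induction E using List.reverseRecOn with
  | nil => exact ⟨rfl, rfl, fun k => ⟨rfl, rfl⟩⟩
  | append_singleton E e ih =>
    obtain ⟨hk1, hk2, hget⟩ := ih
    rw [List.foldl_append, List.foldl_cons, List.foldl_nil]
    set p := E.foldl pvStepA (PySem.Dict.empty, PySem.Dict.empty) with hp
    have hmapk : (E ++ [e]).map (·.1) = E.map (·.1) ++ [e.1] := by simp
    have hKnew : PySem.Set.ofList ((E ++ [e]).map (·.1))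
        = PySem.Set.add (PySem.Set.ofList (E.map (·.1))) e.1 := by
      rw [hmapk, PySem.Set.ofList_append_singleton]
    have hc1 : p.1.contains e.1 = ((pvBest? E e.1).map (·.2)).isSome := by
      rw [PySem.Dict.contains_eq_isSome_get?, (hget e.1).1]
    have hc2 : p.2.contains e.1 = ((pvBest? E e.1).map (·.1)).isSome := by
      rw [PySem.Dict.contains_eq_isSome_get?, (hget e.1).2]
    cases hb : pvBest? E e.1 with
    | none =>
      -- key unseen: condition is true, both dicts get a fresh key
      have hco1 : p.1.contains e.1 = false := by rw [hc1, hb]; rfl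
      have hco2 : p.2.contains e.1 = false := by rw [hc2, hb]; rfl
      have hstep : pvStepA p e = (p.1.insert e.1 e.2.2, p.2.insert e.1 e.2.1) := by
        unfold pvStepA; rw [hco1]; rfl
      have hnotmem : e.1 ∉ PySem.Set.ofList (E.map (·.1)) := by
        rw [← hk1]
        intro hmem
        rw [← PySem.Dict.contains_iff_mem_keys] at hmem
        rw [hco1] at hmem
        exact Bool.false_ne_true hmem
      refine ⟨?_, ?_, ?_⟩
      · rw [hstep, PySem.Dict.keys_insert_of_not_contains _ _ hco1, hk1, hKnew,
            PySem.Set.add_of_not_mem hnotmem]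
      · rw [hstep, PySem.Dict.keys_insert_of_not_contains _ _ hco2, hk2, hKnew,
            PySem.Set.add_of_not_mem hnotmem]
      · intro k
        rw [hstep]
        rw [pvBest?_append]
        by_cases hek : e.1 == k
        · have hek' : k = e.1 := (beq_iff_eq.mp hek).symm
          subst hek'
          simp only [hek, if_pos, hb]
          constructor <;> simp
        · have hek' : k ≠ e.1 := fun h => hek (beq_iff_eq.mpr h.symm)
          simp only [hek, Bool.false_eq_true, if_false]
          exact ⟨by rw [PySem.Dict.get?_insert_of_ne _ _ hek', (hget k).1],
                 by rw [PySem.Dict.get?_insert_of_ne _ _ hek', (hget k).2]⟩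
    | some m =>
      have hco1 : p.1.contains e.1 = true := by rw [hc1, hb]; rfl
      have hco2 : p.2.contains e.1 = true := by rw [hc2, hb]; rfl
      have hgd : p.1.getD e.1 0 = m.2 := by
        rw [PySem.Dict.getD_eq_get?_getD, (hget e.1).1, hb]; rfl
      have hmem : e.1 ∈ PySem.Set.ofList (E.map (·.1)) := by
        rw [← hk1, ← PySem.Dict.contains_iff_mem_keys]; exact hco1
      have hKeq : PySem.Set.ofList ((E ++ [e]).map (·.1))
          = PySem.Set.ofList (E.map (·.1)) := by
        rw [hKnew, PySem.Set.add_of_mem hmem]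
      by_cases hlt : m.2 < e.2.2
      · have hstep : pvStepA p e = (p.1.insert e.1 e.2.2, p.2.insert e.1 e.2.1) := by
          unfold pvStepA
          rw [hco1, hgd]
          simp [hlt]
        refine ⟨?_, ?_, ?_⟩
        · rw [hstep, PySem.Dict.keys_insert_of_contains _ _ hco1, hk1, hKeq]
        · rw [hstep, PySem.Dict.keys_insert_of_contains _ _ hco2, hk2, hKeq]
        · intro k
          rw [hstep, pvBest?_append]
          by_cases hek : e.1 == k
          · have hek' : k = e.1 := (beq_iff_eq.mp hek).symm
            subst hek'
            simp only [hek, if_pos, hb]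
            constructor <;> simp [hlt]
          · have hek' : k ≠ e.1 := fun h => hek (beq_iff_eq.mpr h.symm)
            simp only [hek, Bool.false_eq_true, if_false]
            exact ⟨by rw [PySem.Dict.get?_insert_of_ne _ _ hek', (hget k).1],
                   by rw [PySem.Dict.get?_insert_of_ne _ _ hek', (hget k).2]⟩
      · have hstep : pvStepA p e = p := by
          unfold pvStepA
          rw [hco1, hgd]
          simp [hlt]
        refine ⟨by rw [hstep, hk1, hKeq], by rw [hstep, hk2, hKeq], ?_⟩
        intro k
        rw [hstep, pvBest?_append]
        by_cases hek : e.1 == k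
        · have hek' : k = e.1 := (beq_iff_eq.mp hek).symm
          subst hek'
          simp only [hek, if_pos, hb]
          constructor <;> simp [(hget e.1).1, (hget e.1).2, hb, hlt]
        · simp only [hek, Bool.false_eq_true, if_false]
          exact hget k

-- ===== VERDICT (by name: the statement is the Claim_ definition above) =====
theorem analyze_dicts_spec : Claim_equal_analyze_dicts := by
  intro data_list _hdom
  unfold Spec_analyze_dicts
  rw [pv_A_events, pv_B_events]
  set E := pvEvents data_list with hE
  obtain ⟨hk1, hk2, hget⟩ := pv_A_char E
  set p := E.foldl pvStepA (PySem.Dict.empty, PySem.Dict.empty) with hp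
  set K := PySem.Set.ofList (E.map (·.1)) with hK
  -- B's buckets
  set bk := E.foldl pvStepBk PySem.Dict.empty with hbk
  have hbkkeys : bk.keys = K := by
    have h := PySem.Dict.keys_foldl_modify_key (l := E) (key := fun e => e.1)
      (d0 := ([] : List (Int × Int))) (f := fun _ e => (· ++ [e.2]))
      (d := PySem.Dict.empty)
    rw [hbk]
    show (E.foldl (fun d e => d.modify e.1 [] (· ++ [e.2])) PySem.Dict.empty).keys = K
    rw [h, PySem.Dict.keys_empty, PySem.Set.update_nil_left]
  have hbknodup : bk.keys.Nodup := by rw [hbkkeys]; exact PySem.Set.nodup_ofList _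
  have hbkgetD : ∀ k, bk.getD k [] = pvEnt E k := by
    intro k
    have h := PySem.Dict.getD_foldl_modify_append (l := E) (d := PySem.Dict.empty) (c := k)
    rw [hbk]
    show (E.foldl (fun d e => d.modify e.1 [] (· ++ [e.2])) PySem.Dict.empty).getD k [] = _
    rw [h, PySem.Dict.getD_empty]
    rfl
  have hbkitems : bk.items = K.map (fun k => (k, pvEnt E k)) := by
    rw [PySem.Dict.items_eq_map_keys bk hbknodup ([] : List (Int × Int)), hbkkeys]
    exact List.map_congr_left (fun k _ => by rw [hbkgetD])
  -- every key of K has a best entry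
  have hKbest : ∀ k ∈ K, pvBest? E k = some ((pvBest? E k).getD (0, 0)) := by
    intro k hk
    rcases hbm : pvBest? E k with _ | m
    · exfalso
      obtain ⟨e, he, hek⟩ := List.mem_map.mp ((PySem.Set.mem_ofList _ _).mp hk)
      have hmem : e.2 ∈ pvEnt E k := by
        simp only [pvEnt, List.mem_map, List.mem_filter]
        exact ⟨e, ⟨he, by simp [hek]⟩, rfl⟩
      have : pvEnt E k = [] := by
        unfold pvBest? at hbm
        rwa [PySem.List.max?_eq_none_iff] at hbm
      rw [this] at hmem
      exact List.not_mem_nil hmem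
    · rfl
  -- phase 2 = two fresh-key insert loops
  have hfold2 : bk.items.foldl pvStep2 (PySem.Dict.empty, PySem.Dict.empty)
      = (K.foldl (fun d k => d.insert k ((pvBest? E k).getD (0, 0)).2) PySem.Dict.empty,
         K.foldl (fun d k => d.insert k ((pvBest? E k).getD (0, 0)).1) PySem.Dict.empty) := by
    rw [hbkitems, List.foldl_map]
    have hcong : ∀ (acc : PySem.Dict String Int × PySem.Dict String Int), ∀ k ∈ K,
        pvStep2 acc (k, pvEnt E k)
          = (acc.1.insert k ((pvBest? E k).getD (0, 0)).2,
             acc.2.insert k ((pvBest? E k).getD (0, 0)).1) := by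
      intro acc k hk
      have hbm := hKbest k hk
      set m := (pvBest? E k).getD (0, 0) with hm
      unfold pvBest? at hbm
      simp only [pvStep2, hbm]
    rw [PySem.List.foldl_congr_mem K
      (fun (acc : PySem.Dict String Int × PySem.Dict String Int) k => pvStep2 acc (k, pvEnt E k))
      (fun (acc : PySem.Dict String Int × PySem.Dict String Int) k =>
        (acc.1.insert k ((pvBest? E k).getD (0, 0)).2,
         acc.2.insert k ((pvBest? E k).getD (0, 0)).1))
      (PySem.Dict.empty, PySem.Dict.empty) hcong]
    rw [PySem.List.foldl_prod_mk
      (f := fun (d : PySem.Dict String Int) k => d.insert k ((pvBest? E k).getD (0, 0)).2)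
      (g := fun (d : PySem.Dict String Int) k => d.insert k ((pvBest? E k).getD (0, 0)).1)]
  have hKid : K.map (fun a => a) = K := List.map_id' K
  have hfresh : ∀ (v : String → Int),
      (K.foldl (fun d k => d.insert k (v k)) PySem.Dict.empty).items
        = K.map (fun k => (k, v k)) := by
    intro v
    have h := PySem.Dict.items_foldl_insert_fresh (l := K) (k := fun a => a) (v := v)
      (d := PySem.Dict.empty)
      (fun a _ => PySem.Dict.contains_empty a)
      (by rw [hKid]; exact PySem.Set.nodup_ofList _)
    rw [h]
    rfl
  -- A's items
  have hAitems1 : p.1.items = K.map (fun k => (k, ((pvBest? E k).getD (0, 0)).2)) := by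
    rw [PySem.Dict.items_eq_map_keys p.1 (by rw [hk1]; exact PySem.Set.nodup_ofList _) (0 : Int), hk1]
    refine List.map_congr_left (fun k hk => ?_)
    rw [PySem.Dict.getD_eq_get?_getD, (hget k).1, hKbest k hk]
    rfl
  have hAitems2 : p.2.items = K.map (fun k => (k, ((pvBest? E k).getD (0, 0)).1)) := by
    rw [PySem.Dict.items_eq_map_keys p.2 (by rw [hk2]; exact PySem.Set.nodup_ofList _) (0 : Int), hk2]
    refine List.map_congr_left (fun k hk => ?_)
    rw [PySem.Dict.getD_eq_get?_getD, (hget k).2, hKbest k hk]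
    rfl
  simp only [hfold2, hAitems1, hAitems2, hfresh]
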